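-- pv_equiv track=rewrite | github.com/MertEmirSeker/Windows-Product-Key-Finder | source/key.py | convert_to_key
-- ===== SOURCE A (Python) =====
-- def convert_to_key(digital_id):
--     try:
--         key_offset = 52
--         is_win8 = (digital_id[66] >> 3) & 1
--         digital_id[66] = (digital_id[66] & 0xF7) | ((is_win8 & 2) << 2)
--         chars = "BCDFGHJKMPQRTVWXY2346789"
--         key_output = ''
--
--         last = 0
--         for i in range(24, -1, -1):
--             current = 0
--             for x in range(14, -1, -1):
--                 current = current * 256
--                 current += digital_id[x + key_offset]
--                 digital_id[x + key_offset] = current // 24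
--                 current = current % 24
--                 last = current
--             key_output = chars[current] + key_output
--
--         # Add 'N' character if it is a Windows 8 key
--         if is_win8 == 1:
--             key_output = key_output[:last] + 'N' + key_output[last + 1:]
--
--         # Format the key output into 5-character groups
--         key_parts = [key_output[i:i + 5] for i in range(0, len(key_output), 5)]
--         return '-'.join(key_parts)
--
--     except IndexError:
--         return "Error converting the product key. Invalid Digital ID format."
--     except Exception as e:
--         return f"Unexpected error: {str(e)}"
-- ===== SOURCE B (Python) =====
-- def convert_to_key(digital_id):
--     # Return-value equivalent to A; does NOT mutate digital_id (A overwrites bytes 52..66 in place).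
--     if len(digital_id) < 67:
--         return "Error converting the product key. Invalid Digital ID format."
--     chars = "BCDFGHJKMPQRTVWXY2346789"
--     is_win8 = (digital_id[66] >> 3) & 1
--     # One big integer from the 15 key bytes (index 66 most significant, bit 3 cleared)
--     value = digital_id[66] & 0xF7
--     for i in range(65, 51, -1):
--         value = value * 256 + digital_id[i]
--     out = []
--     last = 0
--     for _ in range(25):
--         value, last = divmod(value, 24)
--         out.append(chars[last])
--     out.reverse()
--     if is_win8 == 1:
--         out[last] = 'N'
--     key = ''.join(out)
--     return '-'.join(key[i:i + 5] for i in range(0, 25, 5))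
-- ===== Notes on version B (the rewrite author's own statement) =====
-- stated objective: alternative
-- what changed: Replaces A's 25 rounds of per-byte base-256 long division over a mutable 15-byte list (25x15 small divmods with list indexing and write-back) by loading the 15 key bytes into one Python big integer and doing 25 big-integer divmod(value, 24) steps; B also does not mutate digital_id (A overwrites bytes 52..66 in place), so equivalence is about the return value.
import Mathlib
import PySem

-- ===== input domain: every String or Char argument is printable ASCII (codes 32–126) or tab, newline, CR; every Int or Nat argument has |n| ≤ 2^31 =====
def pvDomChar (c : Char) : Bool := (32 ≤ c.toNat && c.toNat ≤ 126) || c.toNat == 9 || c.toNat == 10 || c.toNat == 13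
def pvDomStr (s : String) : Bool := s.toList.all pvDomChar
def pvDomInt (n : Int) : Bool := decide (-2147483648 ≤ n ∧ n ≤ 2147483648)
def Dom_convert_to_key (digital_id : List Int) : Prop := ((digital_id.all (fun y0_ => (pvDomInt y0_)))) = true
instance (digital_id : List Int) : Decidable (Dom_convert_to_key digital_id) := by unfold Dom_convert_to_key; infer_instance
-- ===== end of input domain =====

-- B replaces A's 25 rounds of per-byte long division over a mutable 15-byte array by 25 big-integer
-- divmods of one accumulated integer. A mutates digital_id[52..66] in place; B does not — the
-- equivalence proved here is about the RETURN value only.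

-- ===== PORT A =====
def pvErr : String := "Error converting the product key. Invalid Digital ID format."

def pvChars : List Char := "BCDFGHJKMPQRTVWXY2346789".toList

-- chars[i]; every use has 0 ≤ i < 24, so the .getD default is unreachable
def pvCharAt (i : Int) : Char := (PySem.List.pyGet? pvChars i).getD ' '

-- A's inner loop 'for x in range(14, -1, -1)': index 14 is the list's tail, so the recursion
-- processes the tail first; returns the updated byte list and the final 'current' (= 'last')
def pvDivLoopA : List Int → Int → List Int × Int
  | [], current => ([], current)
  | b :: rest, current =>
      let p := pvDivLoopA rest current
      let cur := p.2 * 256 + b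
      (PySem.Int.floordiv cur 24 :: p.1, PySem.Int.mod cur 24)

-- A's outer loop 'for i in range(24, -1, -1)' (i unused): state (bytes, key_output, last)
def pvOuterA : Nat → List Int → List Char → Int → List Char × Int
  | 0, _bs, key, last => (key, last)
  | n + 1, bs, key, _last =>
      let p := pvDivLoopA bs 0
      pvOuterA n p.1 (pvCharAt p.2 :: key) p.2

-- A mutates digital_id[52..66] in place; the port keeps that 15-byte region as local state
-- ('bytes'); the first access digital_id[66] raising IndexError is the caught branch.
def convert_to_key (digital_id : List Int) : String :=
  match PySem.List.pyGet? digital_id 66 with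
  | none => pvErr
  | some b66 =>
      -- '>> 3' is Lean's '>>> 3'; '&' '|' '<< 2' are PySem.Int.band/bor and '<<< 2' (Python-exact)
      let is_win8 := PySem.Int.band (b66 >>> 3) 1
      let b66' := PySem.Int.bor (PySem.Int.band b66 247) (PySem.Int.band is_win8 2 <<< 2)
      let bytes := (PySem.List.slice digital_id (some 52) (some 67)).set 14 b66'
      let p := pvOuterA 25 bytes [] 0
      let key2 := if is_win8 = 1 then
          PySem.List.slice p.1 none (some p.2) ++ 'N' :: PySem.List.slice p.1 (some (p.2 + 1)) none
        else p.1
      let parts := (PySem.List.pyRange 0 (PySem.Chars.len key2) 5).map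
          (fun i => PySem.List.slice key2 (some i) (some (i + 5)))
      String.ofList (PySem.Chars.join ['-'] parts)

-- ===== PORT B =====
-- B's 'for _ in range(25): value, last = divmod(value, 24); out.append(chars[last])'
def pvDivmodLoopB : Nat → Int → List Char → Int → List Char × Int
  | 0, _v, out, last => (out, last)
  | n + 1, v, out, _last =>
      pvDivmodLoopB n (PySem.Int.floordiv v 24) (out ++ [pvCharAt (PySem.Int.mod v 24)])
        (PySem.Int.mod v 24)

def convert_to_key_alt (digital_id : List Int) : String :=
  if digital_id.length < 67 then pvErr
  else
    let b66 := PySem.List.pyGetD digital_id 66 0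
    let is_win8 := PySem.Int.band (b66 >>> 3) 1
    -- value = digital_id[66] & 0xF7, then value = value*256 + b over reversed(digital_id[52:66])
    let value := (PySem.List.slice digital_id (some 52) (some 66)).reverse.foldl
        (fun v b => v * 256 + b) (PySem.Int.band b66 247)
    let p := pvDivmodLoopB 25 value [] 0
    let out := p.1.reverse
    -- out[last] = 'N'; last ∈ [0, 24) so .toNat is exact
    let out2 := if is_win8 = 1 then out.set p.2.toNat 'N' else out
    String.ofList (PySem.Chars.join ['-'] ((PySem.List.pyRange 0 25 5).map
        (fun i => PySem.List.slice out2 (some i) (some (i + 5)))))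

-- ===== PRECONDITION & SPEC =====
def Spec_convert_to_key (digital_id : List Int) (out : String) : Prop := out = convert_to_key_alt digital_id
instance (digital_id : List Int) (out : String) : Decidable (Spec_convert_to_key digital_id out) := by unfold Spec_convert_to_key; infer_instance

-- ===== CLAIM (what is proved, stated in full; the proofs are below) =====
def Claim_equal_convert_to_key : Prop := ∀ (digital_id : List Int), Dom_convert_to_key digital_id → Spec_convert_to_key digital_id (convert_to_key digital_id)

-- ===== LEMMAS AND PROOFS =====

-- little-endian base-256 value of a byte list
def pvVal (bs : List Int) : Int := bs.foldr (fun b acc => acc * 256 + b) 0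

-- A's inner pass is one long division of pvVal bs (plus the incoming carry) by 24
theorem pvDivLoopA_spec (bs : List Int) (c : Int) (h0 : 0 ≤ c) (h1 : c < 24) :
    24 * pvVal (pvDivLoopA bs c).1 + (pvDivLoopA bs c).2 = c * 256 ^ bs.length + pvVal bs
    ∧ 0 ≤ (pvDivLoopA bs c).2 ∧ (pvDivLoopA bs c).2 < 24 := by
  induction bs with
  | nil => simp [pvDivLoopA, pvVal]; omega
  | cons b rest ih =>
      obtain ⟨hval, hr0, hr1⟩ := ih
      have hdm := PySem.Int.floordiv_mul_add_mod ((pvDivLoopA rest c).2 * 256 + b) 24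
      have hm0 := PySem.Int.mod_nonneg ((pvDivLoopA rest c).2 * 256 + b) (by norm_num : (0:Int) < 24)
      have hm1 := PySem.Int.mod_lt ((pvDivLoopA rest c).2 * 256 + b) (by norm_num : (0:Int) < 24)
      refine ⟨?_, by simpa [pvDivLoopA] using hm0, by simpa [pvDivLoopA] using hm1⟩
      simp only [pvDivLoopA, pvVal, List.foldr_cons, List.length_cons]
      simp only [pvVal] at hval
      have : (256:Int) ^ (rest.length + 1) = 256 ^ rest.length * 256 := by ring
      rw [this]
      linear_combination 256 * hval + hdm

theorem pvDivLoopA_divmod (bs : List Int) :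
    pvVal (pvDivLoopA bs 0).1 = PySem.Int.floordiv (pvVal bs) 24
    ∧ (pvDivLoopA bs 0).2 = PySem.Int.mod (pvVal bs) 24 := by
  obtain ⟨hval, hr0, hr1⟩ := pvDivLoopA_spec bs 0 le_rfl (by norm_num)
  have hfd : PySem.Int.floordiv (pvVal bs) 24 = pvVal (pvDivLoopA bs 0).1 :=
    (PySem.Int.floordiv_eq_iff_of_pos (by norm_num)).mpr (by constructor <;> nlinarith)
  have hdm := PySem.Int.floordiv_mul_add_mod (pvVal bs) 24
  exact ⟨hfd.symm, by omega⟩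

-- A's outer loop over the byte array equals B's big-integer divmod loop (B appends then reverses)
theorem pvOuter_eq_divmod (n : Nat) : ∀ (bs : List Int) (acc : List Char) (last : Int),
    pvOuterA n bs acc.reverse last =
      ((pvDivmodLoopB n (pvVal bs) acc last).1.reverse, (pvDivmodLoopB n (pvVal bs) acc last).2) := by
  induction n with
  | zero => intro bs acc last; simp [pvOuterA, pvDivmodLoopB]
  | succ n ih =>
      intro bs acc last
      obtain ⟨hq, hr⟩ := pvDivLoopA_divmod bs
      simp only [pvOuterA, pvDivmodLoopB, hr]
      have : pvCharAt (PySem.Int.mod (pvVal bs) 24) :: acc.reverse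
          = (acc ++ [pvCharAt (PySem.Int.mod (pvVal bs) 24)]).reverse := by simp
      rw [this, ih (pvDivLoopA bs 0).1, hq]

theorem pvDivmodLoopB_last (n : Nat) : ∀ (v last : Int) (acc : List Char), 0 ≤ last → last < 24 →
    0 ≤ (pvDivmodLoopB n v acc last).2 ∧ (pvDivmodLoopB n v acc last).2 < 24 := by
  induction n with
  | zero => intro v last acc h0 h1; exact ⟨h0, h1⟩
  | succ n ih =>
      intro v last acc _ _
      exact ih _ _ _ (PySem.Int.mod_nonneg v (by norm_num)) (PySem.Int.mod_lt v (by norm_num))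

theorem pvDivmodLoopB_len (n : Nat) : ∀ (v last : Int) (acc : List Char),
    (pvDivmodLoopB n v acc last).1.length = acc.length + n := by
  induction n with
  | zero => intro v last acc; simp [pvDivmodLoopB]
  | succ n ih =>
      intro v last acc
      simp only [pvDivmodLoopB]
      rw [ih]; simp; omega

-- folding most-significant-first equals the little-endian value with a seeded top
theorem pvFoldl_reverse_val (xs : List Int) : ∀ (init : Int),
    xs.reverse.foldl (fun v b => v * 256 + b) init = init * 256 ^ xs.length + pvVal xs := by
  induction xs with
  | nil => intro init; simp [pvVal]
  | cons x t ih =>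
      intro init
      simp only [List.reverse_cons, List.foldl_append, List.foldl_cons, List.foldl_nil, ih,
        pvVal, List.foldr_cons, List.length_cons]
      simp only [pvVal] at ih ⊢
      ring

theorem pvVal_append (xs : List Int) (b : Int) :
    pvVal (xs ++ [b]) = b * 256 ^ xs.length + pvVal xs := by
  induction xs with
  | nil => simp [pvVal]
  | cons x t ih =>
      simp only [pvVal, List.cons_append, List.foldr_cons, List.length_cons] at *
      rw [ih]; ring

-- Python's key[:last] + 'N' + key[last+1:] is list.set at index last
theorem pvSlice_set (l : List Char) (i : Int) (h0 : 0 ≤ i) (h1 : i.toNat < l.length) :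
    PySem.List.slice l none (some i) ++ 'N' :: PySem.List.slice l (some (i + 1)) none
      = l.set i.toNat 'N' := by
  rw [PySem.List.slice_to l h0, PySem.List.slice_from l (by omega : (0:Int) ≤ i + 1)]
  rw [List.set_eq_take_cons_drop 'N' h1]
  have : (i + 1).toNat = i.toNat + 1 := by omega
  rw [this]

theorem pvTake_set (l : List Int) (b : Int) (h : 15 ≤ l.length) :
    (l.take 15).set 14 b = l.take 14 ++ [b] := by
  rw [List.set_eq_take_cons_drop b (by simp; omega)]
  simp [List.take_take]

-- ===== VERDICT (by name: the statement is the Claim_ definition above) =====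
theorem convert_to_key_spec : Claim_equal_convert_to_key := by
  intro d _hdom
  unfold Spec_convert_to_key convert_to_key convert_to_key_alt
  by_cases hlen : d.length < 67
  · have hnone : PySem.List.pyGet? d 66 = none := by
      simp [PySem.List.pyGet?, PySem.List.pyIdx?]; omega
    rw [hnone]
    simp [hlen]
  · replace hlen : 67 ≤ d.length := by omega
    have h66 : 66 < d.length := by omega
    have hsome : PySem.List.pyGet? d 66 = some (d.getD 66 0) := by
      simp [PySem.List.pyGet?, PySem.List.pyIdx?, h66]
    rw [hsome]
    have hgetD : PySem.List.pyGetD d 66 0 = d.getD 66 0 := by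
      simp [PySem.List.pyGetD, hsome]
    simp only [if_neg (by omega : ¬ d.length < 67), hgetD]
    set b66 := d.getD 66 0 with hb66
    set is_win8 := PySem.Int.band (b66 >>> 3) 1 with hw8
    -- is_win8 ∈ {0, 1}, hence the '| ((is_win8 & 2) << 2)' term is 0
    have hw : is_win8 = 0 ∨ is_win8 = 1 := by
      rw [hw8, PySem.Int.band_one]
      have := PySem.Int.mod_nonneg (b66 >>> 3) (by norm_num : (0:Int) < 2)
      have := PySem.Int.mod_lt (b66 >>> 3) (by norm_num : (0:Int) < 2)
      omega
    have hmask : PySem.Int.bor (PySem.Int.band b66 247) (PySem.Int.band is_win8 2 <<< 2)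
        = PySem.Int.band b66 247 := by
      rcases hw with h | h <;> rw [h] <;> norm_num [PySem.Int.bor_zero, (by decide : PySem.Int.band 0 2 <<< 2 = 0), (by decide : PySem.Int.band 1 2 <<< 2 = 0)]
    rw [hmask]
    set b66' := PySem.Int.band b66 247 with hb66'
    -- the two slice expressions, as take/drop of d
    have hs67 : PySem.List.slice d (some 52) (some 67) = (d.drop 52).take 15 := by
      rw [PySem.List.slice_toNat d (by norm_num) (by norm_num)]; rfl
    have hs66 : PySem.List.slice d (some 52) (some 66) = (d.drop 52).take 14 := by
      rw [PySem.List.slice_toNat d (by norm_num) (by norm_num)]; rfl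
    have hdlen : 15 ≤ (d.drop 52).length := by simp; omega
    have hbytes : (PySem.List.slice d (some 52) (some 67)).set 14 b66'
        = (d.drop 52).take 14 ++ [b66'] := by
      rw [hs67, pvTake_set _ _ hdlen]
    -- value agreement: pvVal of A's byte array = B's folded big integer
    have htlen : ((d.drop 52).take 14).length = 14 := by simp; omega
    have hval : pvVal ((PySem.List.slice d (some 52) (some 67)).set 14 b66')
        = (PySem.List.slice d (some 52) (some 66)).reverse.foldl (fun v b => v * 256 + b) b66' := by
      rw [hbytes, hs66, pvVal_append, pvFoldl_reverse_val, htlen]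
    -- the two main loops agree
    have hloop := pvOuter_eq_divmod 25 ((PySem.List.slice d (some 52) (some 67)).set 14 b66') [] 0
    simp only [List.reverse_nil] at hloop
    rw [hval] at hloop
    set q := pvDivmodLoopB 25 ((PySem.List.slice d (some 52) (some 66)).reverse.foldl
        (fun v b => v * 256 + b) b66') [] 0 with hq
    rw [hloop]
    -- last ∈ [0,24), key length 25
    have hlast : 0 ≤ q.2 ∧ q.2 < 24 := pvDivmodLoopB_last 25 _ 0 [] le_rfl (by norm_num)
    have hklen : q.1.reverse.length = 25 := by
      rw [List.length_reverse, pvDivmodLoopB_len]; rfl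
    -- the N-substitution agrees
    have hsub : (if is_win8 = 1 then
          PySem.List.slice q.1.reverse none (some q.2) ++ 'N'
            :: PySem.List.slice q.1.reverse (some (q.2 + 1)) none
        else q.1.reverse)
        = (if is_win8 = 1 then q.1.reverse.set q.2.toNat 'N' else q.1.reverse) := by
      rcases hw with h | h
      · simp [h]
      · simp only [h]
        exact pvSlice_set _ _ hlast.1 (by omega)
    rw [hsub]
    -- the grouped join agrees: the length of the (possibly substituted) key is 25
    have hlen2 : PySem.Chars.len (if is_win8 = 1 then q.1.reverse.set q.2.toNat 'N' else q.1.reverse)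
        = (25 : Int) := by
      rcases hw with h | h <;> simp [h, PySem.Chars.len, hklen]
    rw [hlen2]
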